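-- pv_equiv track=rewrite | github.com/syedtaz/dsa | python/src/leetcode/250-299/255.py | verifyPreorder
-- ===== SOURCE A (Python) =====
-- from typing import List
--
-- def verifyPreorder(preorder: List[int]) -> bool:
--     match len(preorder) % 2:
--         case 0:
--             left = preorder[: len(preorder) // 2]
--             right = preorder[len(preorder) // 2 :]
--         case 1:
--             left = preorder[: len(preorder) // 2]
--             right = preorder[len(preorder) // 2 :]
--         case _:
--             raise Exception
--     return all([x > y for x, y in zip(left, left[1:])]) and all(
--         [x < y for x, y in zip(right, right[1:])]
--     )
-- ===== SOURCE B (Python) =====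
-- def verifyPreorder(preorder):
--     mid = len(preorder) // 2
--     left, right = preorder[:mid], preorder[mid:]
--     return left == sorted(set(left), reverse=True) and right == sorted(set(right))
-- ===== Notes on version B (the rewrite author's own statement) =====
-- stated objective: alternative
-- what changed: Replaced A's two adjacent-pair zip-comprehension scans with a sorting-based characterization: each half is strictly monotone iff it equals the (descending resp. ascending) sort of its deduplicated element set.
import Mathlib
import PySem

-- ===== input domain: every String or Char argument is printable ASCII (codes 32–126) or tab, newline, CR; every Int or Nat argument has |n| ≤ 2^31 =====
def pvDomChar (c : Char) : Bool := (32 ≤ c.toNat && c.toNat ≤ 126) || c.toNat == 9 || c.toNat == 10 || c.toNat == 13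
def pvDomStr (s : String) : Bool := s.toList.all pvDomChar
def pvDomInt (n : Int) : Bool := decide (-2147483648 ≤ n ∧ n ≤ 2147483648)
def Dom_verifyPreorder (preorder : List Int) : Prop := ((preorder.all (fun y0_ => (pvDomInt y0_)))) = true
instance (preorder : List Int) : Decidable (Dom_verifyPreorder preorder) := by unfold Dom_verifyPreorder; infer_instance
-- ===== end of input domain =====

-- B replaces A's adjacent-pair scans with a sorting-based characterization: each half is
-- strictly monotone iff it equals the (descending resp. ascending) sort of its element set
-- (objective: alternative algorithm, not faster).

-- ===== PORT A =====
-- Python's cases 0 and 1 of 'match len % 2' carry identical code; 'case _: raise' is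
-- unreachable since len % 2 < 2, so A is total (the '_' arm below is the case-1 code).
def verifyPreorder (preorder : List Int) : Bool :=
  match preorder.length % 2 with
  | 0 =>
    let left := PySem.List.slice preorder none (some ((preorder.length / 2 : Nat) : Int))
    let right := PySem.List.slice preorder (some ((preorder.length / 2 : Nat) : Int)) none
    ((left.zip (PySem.List.slice left (some 1) none)).all (fun xy => decide (xy.1 > xy.2))) &&
      ((right.zip (PySem.List.slice right (some 1) none)).all (fun xy => decide (xy.1 < xy.2)))
  | _ =>
    let left := PySem.List.slice preorder none (some ((preorder.length / 2 : Nat) : Int))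
    let right := PySem.List.slice preorder (some ((preorder.length / 2 : Nat) : Int)) none
    ((left.zip (PySem.List.slice left (some 1) none)).all (fun xy => decide (xy.1 > xy.2))) &&
      ((right.zip (PySem.List.slice right (some 1) none)).all (fun xy => decide (xy.1 < xy.2)))

-- ===== PORT B =====
-- left == sorted(set(left), reverse=True) and right == sorted(set(right))
def verifyPreorder_alt (preorder : List Int) : Bool :=
  let left := PySem.List.slice preorder none (some ((preorder.length / 2 : Nat) : Int))
  let right := PySem.List.slice preorder (some ((preorder.length / 2 : Nat) : Int)) none
  decide (left = PySem.List.sorted (PySem.Set.ofList left) (fun x => x) true) &&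
    decide (right = PySem.List.sorted (PySem.Set.ofList right) (fun x => x) false)

-- ===== PRECONDITION & SPEC =====
def Spec_verifyPreorder (preorder : List Int) (out : Bool) : Prop := out = verifyPreorder_alt preorder
instance (preorder : List Int) (out : Bool) : Decidable (Spec_verifyPreorder preorder out) := by unfold Spec_verifyPreorder; infer_instance

-- ===== CLAIM =====
def Claim_equal_verifyPreorder : Prop := ∀ (preorder : List Int), Dom_verifyPreorder preorder → Spec_verifyPreorder preorder (verifyPreorder preorder)

-- ===== LEMMAS AND PROOFS =====

-- A's zip-with-tail scan is an IsChain
theorem zip_tail_all_chain' (q : Int × Int → Bool) (l : List Int) :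
    ((l.zip l.tail).all q) = true ↔
      List.IsChain (fun a b => q (a, b) = true) l := by
  induction l with
  | nil => simp
  | cons x xs ih =>
    cases xs with
    | nil => simp
    | cons y t =>
      simp only [List.tail_cons] at ih ⊢
      rw [List.zip_cons_cons, List.all_cons, Bool.and_eq_true, ih, List.isChain_cons_cons]

-- a list equals the ascending sort of its set iff it is strictly increasing
theorem asc_char (l : List Int) :
    l = PySem.List.sorted (PySem.Set.ofList l) (fun x => x) false ↔ l.Pairwise (· < ·) := by
  constructor
  · intro h
    rw [h]
    exact PySem.List.sorted_ofList_pairwise_lt l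
  · intro h
    have hnd : l.Nodup := h.imp (fun hab => ne_of_lt hab)
    rw [PySem.Set.ofList_eq_self_of_nodup l hnd]
    exact (PySem.List.sorted_eq_self_of_pairwise l (fun x => x)
      (h.imp (fun hab => le_of_lt hab))).symm

-- a list equals the descending sort of its set iff it is strictly decreasing
theorem desc_char (l : List Int) :
    l = PySem.List.sorted (PySem.Set.ofList l) (fun x => x) true ↔ l.Pairwise (· > ·) := by
  constructor
  · intro h
    have hge : l.Pairwise (fun a b : Int => b ≤ a) := by
      rw [h]; exact PySem.List.sorted_pairwise_rev (PySem.Set.ofList l) (fun x => x)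
    have hnd : l.Nodup := by
      rw [h]
      exact ((PySem.List.sorted_perm (PySem.Set.ofList l) (fun x => x) true).nodup_iff).mpr
        (PySem.Set.nodup_ofList l)
    exact (hge.and hnd).imp (fun hab => lt_of_le_of_ne hab.1 (Ne.symm hab.2))
  · intro h
    have hnd : l.Nodup := h.imp (fun hab => (ne_of_lt hab).symm)
    rw [PySem.Set.ofList_eq_self_of_nodup l hnd]
    exact (PySem.List.sorted_rev_eq_self_of_pairwise l (fun x => x)
      (h.imp (fun hab => le_of_lt hab))).symm

theorem verifyPreorder_eq_body (a : List Int) :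
    verifyPreorder a =
      (((a.take (a.length / 2)).zip (a.take (a.length / 2)).tail).all
          (fun xy => decide (xy.1 > xy.2)) &&
        ((a.drop (a.length / 2)).zip (a.drop (a.length / 2)).tail).all
          (fun xy => decide (xy.1 < xy.2))) := by
  unfold verifyPreorder
  rcases Nat.mod_two_eq_zero_or_one a.length with h | h <;>
    rw [h] <;>
    simp only [PySem.List.slice_to_natCast, PySem.List.slice_from_natCast,
      PySem.List.slice_from_one]

-- adjacent-pair scan ⟺ the sorted-set characterization, per half
theorem half_desc (l : List Int) :
    ((l.zip l.tail).all (fun xy => decide (xy.1 > xy.2))) =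
      decide (l = PySem.List.sorted (PySem.Set.ofList l) (fun x => x) true) := by
  refine Bool.eq_iff_iff.mpr ?_
  rw [zip_tail_all_chain', decide_eq_true_eq, desc_char]
  simp only [decide_eq_true_eq]
  exact List.isChain_iff_pairwise

theorem half_asc (l : List Int) :
    ((l.zip l.tail).all (fun xy => decide (xy.1 < xy.2))) =
      decide (l = PySem.List.sorted (PySem.Set.ofList l) (fun x => x) false) := by
  refine Bool.eq_iff_iff.mpr ?_
  rw [zip_tail_all_chain', decide_eq_true_eq, asc_char]
  simp only [decide_eq_true_eq]
  exact List.isChain_iff_pairwise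

-- ===== VERDICT =====
theorem verifyPreorder_spec : Claim_equal_verifyPreorder := by
  intro a _
  show verifyPreorder a = verifyPreorder_alt a
  rw [verifyPreorder_eq_body]
  unfold verifyPreorder_alt
  simp only [PySem.List.slice_to_natCast, PySem.List.slice_from_natCast]
  rw [half_desc, half_asc]
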